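-- pv_equiv track=rewrite | github.com/Dean20030514/Renpy-Translator | file_processor/patcher.py | _count_unescaped_quote
-- ===== SOURCE A (Python) =====
-- def _count_unescaped_quote(line: str, quote: str) -> int:
--     """统计一行内未被反斜杠转义的引号数量。"""
--     count = 0
--     escaped = False
--     for ch in line:
--         if escaped:
--             escaped = False
--             continue
--         if ch == '\\':
--             escaped = True
--             continue
--         if ch == quote:
--             count += 1
--     return count
-- ===== SOURCE B (Python) =====
-- def _count_unescaped_quote(line: str, quote: str) -> int:
--     """Two staged passes: precompute the length of the backslash run ending
--     before each position, then count quote chars whose run has even length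
--     (an odd run means the char is escaped; a backslash itself never counts,
--     it starts an escape)."""
--     runs = []  # runs[i] = length of the maximal '\' run ending just before index i
--     r = 0
--     for ch in line:
--         runs.append(r)
--         r = r + 1 if ch == '\\' else 0
--     return sum(1 for r, ch in zip(runs, line)
--                if ch == quote and ch != '\\' and r % 2 == 0)
-- ===== Notes on version B (the rewrite author's own statement) =====
-- stated objective: alternative
-- what changed: Replaces the stateful escape-flag scan with a run-parity characterization: a staged pass precomputes for every position the length of the backslash run ending before it, then quotes at even-run positions are counted (odd run = escaped).
import Mathlib
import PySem

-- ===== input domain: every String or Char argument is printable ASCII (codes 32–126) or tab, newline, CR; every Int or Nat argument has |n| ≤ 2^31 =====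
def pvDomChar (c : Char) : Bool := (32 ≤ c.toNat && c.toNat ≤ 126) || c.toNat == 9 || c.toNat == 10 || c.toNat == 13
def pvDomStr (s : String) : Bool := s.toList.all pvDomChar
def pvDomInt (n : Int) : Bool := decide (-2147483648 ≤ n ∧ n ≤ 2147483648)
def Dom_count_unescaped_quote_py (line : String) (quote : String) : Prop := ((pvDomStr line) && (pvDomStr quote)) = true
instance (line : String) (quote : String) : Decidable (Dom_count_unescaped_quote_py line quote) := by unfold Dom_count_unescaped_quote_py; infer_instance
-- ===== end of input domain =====

-- B replaces the escape-flag scan by a run-parity characterization (staged passes: backslash-run array, then a parity-filtered count); alternative decomposition, same cost.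

-- ===== PORT A =====
-- one loop step of A: state = (count, escaped)
def pvStepA (quote : String) (st : Int × Bool) (ch : Char) : Int × Bool :=
  if st.2 then (st.1, false)
  else if ch = '\\' then (st.1, true)
  else if String.ofList [ch] = quote then (st.1 + 1, st.2)
  else st

def count_unescaped_quote_py (line : String) (quote : String) : Int :=
  (line.toList.foldl (pvStepA quote) (0, false)).1

-- ===== PORT B =====
-- pass 1 of Source B: runs[i] = length of the backslash run ending just before index i
def pvRunsB (cs : List Char) : List Nat :=
  (cs.foldl (fun (st : List Nat × Nat) ch =>
      (st.1 ++ [st.2], if ch = '\\' then st.2 + 1 else 0)) ([], 0)).1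

-- pass 2 of Source B: sum(1 for r, ch in zip(runs, line) if ch == quote and ch != '\\' and r % 2 == 0)
def pvPredB (quote : String) (rc : Nat × Char) : Bool :=
  (String.ofList [rc.2] == quote) && (rc.2 != '\\') && (rc.1 % 2 == 0)

def count_unescaped_quote_py_alt (line : String) (quote : String) : Int :=
  (((pvRunsB line.toList).zip line.toList).countP (pvPredB quote) : Int)

-- ===== PRECONDITION & SPEC =====
def Spec_count_unescaped_quote_py (line : String) (quote : String) (out : Int) : Prop := out = count_unescaped_quote_py_alt line quote
instance (line : String) (quote : String) (out : Int) : Decidable (Spec_count_unescaped_quote_py line quote out) := by unfold Spec_count_unescaped_quote_py; infer_instance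

-- ===== CLAIM (what is proved, stated in full; the proofs are below) =====
def Claim_equal_count_unescaped_quote_py : Prop := ∀ (line : String) (quote : String), Dom_count_unescaped_quote_py line quote → Spec_count_unescaped_quote_py line quote (count_unescaped_quote_py line quote)

-- ===== LEMMAS AND PROOFS =====
-- the run list written as a simple recursion (seeded with run length r)
def pvRunsAux (r : Nat) : List Char → List Nat
  | [] => []
  | c :: cs => r :: pvRunsAux (if c = '\\' then r + 1 else 0) cs

theorem pvRunsB_eq_aux (cs : List Char) (acc : List Nat) (r : Nat) :
    (cs.foldl (fun (st : List Nat × Nat) ch =>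
      (st.1 ++ [st.2], if ch = '\\' then st.2 + 1 else 0)) (acc, r)).1
    = acc ++ pvRunsAux r cs := by
  induction cs generalizing acc r with
  | nil => simp [pvRunsAux]
  | cons c cs ih => simp [List.foldl, pvRunsAux, ih]

-- key invariant: A's (count, escaped) fold over the rest equals count plus B's
-- parity-filtered count, where escaped = (current backslash run r is odd)
theorem pvKey (quote : String) (cs : List Char) (count : Int) (r : Nat) :
    (cs.foldl (pvStepA quote) (count, decide (r % 2 = 1))).1
      = count + (((pvRunsAux r cs).zip cs).countP (pvPredB quote) : Int) := by
  induction cs generalizing count r with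
  | nil => simp [pvRunsAux]
  | cons c cs ih =>
    by_cases hodd : r % 2 = 1
    · -- escaped: the char is consumed, run restarts (parity of the new run is even)
      have hnext : decide ((if c = '\\' then r + 1 else 0) % 2 = 1) = false := by
        split
        · simp; omega
        · simp
      have := ih count (if c = '\\' then r + 1 else 0)
      rw [hnext] at this
      simp [List.foldl, pvStepA, pvRunsAux, pvPredB, hodd, this]
    · by_cases hb : c = '\\'
      · have hnext : decide ((r + 1) % 2 = 1) = true := by simp; omega
        have := ih count (r + 1)
        rw [hnext] at this
        simp [List.foldl, pvStepA, pvRunsAux, pvPredB, hodd, hb, this]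
      · have heven : r % 2 = 0 := by omega
        by_cases hq : String.ofList [c] = quote
        · have := ih (count + 1) 0
          norm_num at this
          simp [List.foldl, pvStepA, pvRunsAux, pvPredB, hb, hq, heven, this]
          omega
        · have := ih count 0
          norm_num at this
          simp [List.foldl, pvStepA, pvRunsAux, pvPredB, hb, hq, heven, this]

-- ===== VERDICT (by name: the statement is the Claim_ definition above) =====
theorem count_unescaped_quote_py_spec : Claim_equal_count_unescaped_quote_py := by
  intro line quote _
  unfold Spec_count_unescaped_quote_py count_unescaped_quote_py count_unescaped_quote_py_alt
  rw [pvRunsB, pvRunsB_eq_aux, List.nil_append]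
  simpa using pvKey quote line.toList 0 0
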